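-- pv_equiv track=rewrite | github.com/crisious/aeterna-chronicle-web | tools/asset-pipeline/spritesheet_generator.py | auto_detect_animations
-- ===== SOURCE A (Python) =====
-- def auto_detect_animations(frame_names: list[str]) -> dict[str, list[str]]:
--     """프레임 이름에서 애니메이션 그룹을 자동 감지한다.
--
--     네이밍 규칙: {animation}_{direction}_{frame_number}
--     예: idle_down_0, walk_left_3
--     """
--     groups: dict[str, list[str]] = {}
--     for name in frame_names:
--         parts = name.rsplit("_", 1)
--         if len(parts) == 2 and parts[1].isdigit():
--             group_name = parts[0]
--         else:
--             group_name = name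
--         groups.setdefault(group_name, []).append(name)
--
--     # 각 그룹 내 프레임을 정렬
--     for key in groups:
--         groups[key].sort()
--
--     return groups
-- ===== SOURCE B (Python) =====
-- def auto_detect_animations(frame_names: list[str]) -> dict[str, list[str]]:
--     def group_key(name: str) -> str:
--         head, sep, tail = name.rpartition("_")
--         return head if sep and tail.isdigit() else name
--
--     keys = list(dict.fromkeys(group_key(n) for n in frame_names))
--     return {k: sorted(n for n in frame_names if group_key(n) == k) for k in keys}
-- ===== Notes on version B (the rewrite author's own statement) =====
-- stated objective: alternative
-- what changed: Replaces A's setdefault-append dict accumulation followed by in-place per-group sorts with a declarative two-phase build: dedup the group keys in first-appearance order via dict.fromkeys, then construct each group directly as sorted(filter of the input) in one dict comprehension.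
import Mathlib
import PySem

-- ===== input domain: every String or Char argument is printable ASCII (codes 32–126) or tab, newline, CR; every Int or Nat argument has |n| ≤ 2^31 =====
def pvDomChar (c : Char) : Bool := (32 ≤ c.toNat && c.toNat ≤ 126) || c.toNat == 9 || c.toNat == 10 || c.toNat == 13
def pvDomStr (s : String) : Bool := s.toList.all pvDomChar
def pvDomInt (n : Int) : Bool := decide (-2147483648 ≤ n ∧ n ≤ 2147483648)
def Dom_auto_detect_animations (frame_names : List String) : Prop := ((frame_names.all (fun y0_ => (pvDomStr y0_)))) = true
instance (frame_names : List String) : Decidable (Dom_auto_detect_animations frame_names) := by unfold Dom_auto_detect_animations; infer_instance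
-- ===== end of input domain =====

-- B rebuilds the result declaratively (dedup keys, then sorted filter per key) instead of A's
-- setdefault-append accumulation followed by in-place per-group sorts; alternative decomposition, no speed claim.


-- ===== PORT A =====
-- hand port of name.rsplit("_", 1) (no PySem primitive): exact — [name] if '_' absent,
-- else the pieces before and after the LAST '_' (Str.rfind = highest index or -1)
def pvRsplitU1 (name : String) : List String :=
  let r := PySem.Str.rfind name "_"
  if r = -1 then [name]
  else [PySem.Str.slice name none (some r), PySem.Str.slice name (some (r + 1)) none]

def auto_detect_animations (frame_names : List String) : List (String × List String) :=
  let groups : PySem.Dict String (List String) :=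
    frame_names.foldl (fun d name =>
      let parts := pvRsplitU1 name
      let group_name :=
        if parts.length = 2 ∧ PySem.Str.strIsdigit (PySem.List.pyGetD parts 1 "") = true
        then PySem.List.pyGetD parts 0 "" else name
      -- groups.setdefault(group_name, []).append(name) : d[g] := d.get(g, []) ++ [name]
      d.modify group_name [] (· ++ [name])) PySem.Dict.empty
  -- for key in groups: groups[key].sort()  (in-place write keeps each key's position)
  groups.items.map (fun p => (p.1, PySem.List.sorted p.2 (fun x => x) false))

-- ===== PORT B =====
-- hand port of B's rpartition-based group_key (no PySem rpartition): sep is nonempty iff rfind ≠ -1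
def pvGroupKey (name : String) : String :=
  let r := PySem.Str.rfind name "_"
  if r = -1 then name
  else if PySem.Str.strIsdigit (PySem.Str.slice name (some (r + 1)) none) = true
       then PySem.Str.slice name none (some r) else name

def auto_detect_animations_alt (frame_names : List String) : List (String × List String) :=
  let keys := PySem.List.dedup (frame_names.map pvGroupKey)
  keys.map (fun k =>
    (k, PySem.List.sorted (frame_names.filter (fun n => pvGroupKey n == k)) (fun x => x) false))

-- ===== PRECONDITION & SPEC =====
def Spec_auto_detect_animations (frame_names : List String) (out : List (String × List String)) : Prop := out = auto_detect_animations_alt frame_names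
instance (frame_names : List String) (out : List (String × List String)) : Decidable (Spec_auto_detect_animations frame_names out) := by unfold Spec_auto_detect_animations; infer_instance

-- ===== CLAIM (what is proved, stated in full; the proofs are below) =====
def Claim_equal_auto_detect_animations : Prop := ∀ (frame_names : List String), Dom_auto_detect_animations frame_names → Spec_auto_detect_animations frame_names (auto_detect_animations frame_names)

-- ===== LEMMAS AND PROOFS =====

-- A's inline group-name expression computes B's key
theorem pvKey_eq (name : String) :
    (if (pvRsplitU1 name).length = 2 ∧
        PySem.Str.strIsdigit (PySem.List.pyGetD (pvRsplitU1 name) 1 "") = true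
     then PySem.List.pyGetD (pvRsplitU1 name) 0 "" else name) = pvGroupKey name := by
  unfold pvRsplitU1 pvGroupKey
  by_cases h : PySem.Str.rfind name "_" = -1 <;>
    simp [PySem.List.pyGetD] <;> split_ifs <;> simp_all

-- an association list with distinct keys is its key list paired with its lookups
theorem pvItems_eq_keys_map {ν : Type} (dflt : ν) (l : List (String × ν))
    (h : (l.map Prod.fst).Nodup) :
    l = (l.map Prod.fst).map (fun k => (k, (PySem.Dict.mk l).getD k dflt)) := by
  induction l with
  | nil => simp
  | cons p rest ih =>
    obtain ⟨k, v⟩ := p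
    simp only [List.map_cons, List.nodup_cons] at h ⊢
    have hk : (PySem.Dict.mk ((k, v) :: rest)).getD k dflt = v := by
      simp [PySem.Dict.getD, PySem.Dict.get?_mk_cons]
    have htail : (rest.map Prod.fst).map
          (fun k' => (k', (PySem.Dict.mk ((k, v) :: rest)).getD k' dflt))
        = (rest.map Prod.fst).map (fun k' => (k', (PySem.Dict.mk rest).getD k' dflt)) := by
      apply List.map_congr_left
      intro a ha
      have hne : ¬ (k == a) = true := by
        intro hba
        exact h.1 (by simpa [eq_of_beq hba] using ha)
      simp [PySem.Dict.getD, PySem.Dict.get?_mk_cons, hne]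
    rw [hk, htail, ← ih h.2]

-- the accumulated (unsorted) groups of A, characterised
theorem pvGroups_items (frame_names : List String) :
    (frame_names.foldl (fun d n => d.modify (pvGroupKey n) [] (· ++ [n]))
      (PySem.Dict.empty : PySem.Dict String (List String))).items
    = (PySem.List.dedup (frame_names.map pvGroupKey)).map
        (fun k => (k, frame_names.filter (fun n => pvGroupKey n == k))) := by
  have hkeys :
      (frame_names.foldl (fun d n => d.modify (pvGroupKey n) [] (· ++ [n]))
        (PySem.Dict.empty : PySem.Dict String (List String))).keys
      = PySem.List.dedup (frame_names.map pvGroupKey) := by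
    rw [PySem.Dict.keys_foldl_modify_key frame_names pvGroupKey []
      (fun _ n => (· ++ [n])) PySem.Dict.empty, PySem.List.dedup_eq_ofList]
    rfl
  have hnodup :
      ((frame_names.foldl (fun d n => d.modify (pvGroupKey n) [] (· ++ [n]))
        (PySem.Dict.empty : PySem.Dict String (List String))).items.map Prod.fst).Nodup := by
    have := PySem.Dict.nodup_keys_foldl_modify_key frame_names pvGroupKey []
      (fun _ n => (· ++ [n])) (PySem.Dict.empty : PySem.Dict String (List String)) (by simp [PySem.Dict.empty, PySem.Dict.keys])
    simpa [PySem.Dict.keys] using this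
  have hgetD : ∀ k,
      (frame_names.foldl (fun d n => d.modify (pvGroupKey n) [] (· ++ [n]))
        (PySem.Dict.empty : PySem.Dict String (List String))).getD k []
      = frame_names.filter (fun n => pvGroupKey n == k) := by
    intro k
    have h1 := PySem.Dict.getD_foldl_modify_append
      (frame_names.map (fun n => (pvGroupKey n, n)))
      (PySem.Dict.empty : PySem.Dict String (List String)) k
    rw [List.foldl_map] at h1
    simpa [List.filter_map, List.map_map, Function.comp_def,
      PySem.Dict.empty, PySem.Dict.getD, PySem.Dict.get?] using h1
  calc (frame_names.foldl (fun d n => d.modify (pvGroupKey n) [] (· ++ [n]))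
        (PySem.Dict.empty : PySem.Dict String (List String))).items
      = ((frame_names.foldl (fun d n => d.modify (pvGroupKey n) [] (· ++ [n]))
          (PySem.Dict.empty : PySem.Dict String (List String))).items.map Prod.fst).map
          (fun k => (k, (frame_names.foldl (fun d n => d.modify (pvGroupKey n) [] (· ++ [n]))
            (PySem.Dict.empty : PySem.Dict String (List String))).getD k [])) := by
        exact pvItems_eq_keys_map [] _ hnodup
    _ = _ := by
        have hk' :
            (frame_names.foldl (fun d n => d.modify (pvGroupKey n) [] (· ++ [n]))
              (PySem.Dict.empty : PySem.Dict String (List String))).items.map Prod.fst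
            = PySem.List.dedup (frame_names.map pvGroupKey) := by
          simpa [PySem.Dict.keys] using hkeys
        rw [hk']
        exact List.map_congr_left (fun k _ => by rw [hgetD k])

-- ===== VERDICT (by name: the statement is the Claim_ definition above) =====
theorem auto_detect_animations_spec : Claim_equal_auto_detect_animations := by
  intro frame_names _
  unfold Spec_auto_detect_animations auto_detect_animations auto_detect_animations_alt
  have hfold :
      (frame_names.foldl (fun d name =>
        let parts := pvRsplitU1 name
        let group_name :=
          if parts.length = 2 ∧ PySem.Str.strIsdigit (PySem.List.pyGetD parts 1 "") = true
          then PySem.List.pyGetD parts 0 "" else name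
        d.modify group_name [] (· ++ [name])) (PySem.Dict.empty : PySem.Dict String (List String)))
      = frame_names.foldl (fun d n => d.modify (pvGroupKey n) [] (· ++ [n])) PySem.Dict.empty := by
    congr 1
    funext d name
    simp only [pvKey_eq]
  simp only [hfold, pvGroups_items, List.map_map]
  rfl
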